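-- pv_equiv track=rewrite | github.com/Albtony/practice-programming | Codewars/Python/Encrypt This.py | encrypt_this
-- ===== SOURCE A (Python) =====
-- def encrypt_this(text):
--     # split to iterate word
--     text = text.split()
--     result = ''
--     for word in text:
--         # transform to list so swapping is easy
--         word  = list(word)
--         if len(word) > 1:
--             word[1], word[len(word)-1] = word[len(word)-1], word[1]
--         word[0] = str((ord(word[0])))
--         # combine and combine
--         word = ''.join(word)
--         result += word + ' '
--     # remove excess whitespace
--     result = result[:len(result)-1]
--     return result
-- ===== SOURCE B (Python) =====
-- def _encode(buf):
--     n = len(buf)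
--     return str(ord(buf[0])) + ''.join(
--         buf[n - 1 if i == 1 else (1 if i == n - 1 else i)] for i in range(1, n))
--
-- def encrypt_this(text):
--     pieces = []
--     buf = []
--     for ch in text:
--         if ch.isspace():
--             if buf:
--                 pieces.append(_encode(buf))
--                 buf = []
--         else:
--             buf.append(ch)
--     if buf:
--         pieces.append(_encode(buf))
--     return ' '.join(pieces)
-- ===== Notes on version B (the rewrite author's own statement) =====
-- stated objective: alternative
-- what changed: B never calls split(): it makes a single character-level pass over the raw text with an explicit word-buffer state machine, flushing each buffered word at whitespace boundaries through an index-permutation comprehension (output position i reads source index n-1, 1 or i) instead of A's split(), per-word list conversion, in-place swap and string-concatenation accumulation with a trailing-space trim.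
import Mathlib
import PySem

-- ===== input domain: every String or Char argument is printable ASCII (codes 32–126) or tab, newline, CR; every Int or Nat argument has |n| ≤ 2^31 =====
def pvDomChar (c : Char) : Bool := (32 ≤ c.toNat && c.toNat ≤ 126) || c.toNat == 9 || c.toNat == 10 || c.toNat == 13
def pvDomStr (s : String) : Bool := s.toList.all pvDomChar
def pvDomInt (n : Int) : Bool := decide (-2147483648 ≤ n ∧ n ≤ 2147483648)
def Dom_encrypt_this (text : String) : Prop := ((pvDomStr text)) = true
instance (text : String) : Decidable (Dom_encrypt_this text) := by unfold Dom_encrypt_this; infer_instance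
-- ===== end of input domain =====

-- B replaces A's split()-then-mutate-each-word loop by a single character-level pass over the
-- raw text (an explicit word-buffer state machine, no split) and encrypts each flushed word by
-- an index-permutation comprehension instead of an in-place swap (objective: alternative).

-- ===== PORT A =====
-- per-word body of A's loop: list(word), swap word[1] and word[-1] when len > 1,
-- word[0] = str(ord(word[0])), ''.join (the [] branch is unreachable: split() yields nonempty words)
def pvEncWordA (w : List Char) : List Char :=
  let w2 := if 1 < w.length then
      PySem.List.pySetD
        (PySem.List.pySetD w 1 (PySem.List.pyGetD w ((w.length : Int) - 1) ' '))
        ((w.length : Int) - 1) (PySem.List.pyGetD w 1 ' ')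
    else w
  match w2 with
  | [] => []
  | c :: rest => PySem.Int.toChars (c.toNat : Int) ++ rest

def encrypt_this (text : String) : String :=
  let words := PySem.Chars.split₀ text.toList
  let result := words.foldl (fun acc w => acc ++ (pvEncWordA w ++ [' '])) []
  String.ofList (PySem.List.slice result none (some ((result.length : Int) - 1)))

-- ===== PORT B =====
-- _encode(buf): str(ord(buf[0])) + ''.join(buf[n-1 if i==1 else (1 if i==n-1 else i)] for i in range(1,n))
def pvEncB (buf : List Char) : List Char :=
  let n : Int := buf.length
  PySem.Int.toChars ((PySem.List.pyGetD buf 0 ' ').toNat : Int) ++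
    (PySem.List.pyRange 1 n 1).map (fun i =>
      PySem.List.pyGetD buf (if i = 1 then n - 1 else if i = n - 1 then 1 else i) ' ')

-- single pass over text's characters: buffer the current word, flush it through _encode at
-- each whitespace boundary (and once at the end), then ' '.join the pieces
def encrypt_this_alt (text : String) : String :=
  let st := text.toList.foldl
    (fun (st : List (List Char) × List Char) ch =>
      if PySem.Chars.isspace ch then
        if st.2.isEmpty then st else (st.1 ++ [pvEncB st.2], [])
      else (st.1, st.2 ++ [ch]))
    ([], [])
  let pieces := if st.2.isEmpty then st.1 else st.1 ++ [pvEncB st.2]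
  String.ofList (PySem.Chars.join [' '] pieces)

-- ===== PRECONDITION & SPEC =====
def Spec_encrypt_this (text : String) (out : String) : Prop := out = encrypt_this_alt text
instance (text : String) (out : String) : Decidable (Spec_encrypt_this text out) := by unfold Spec_encrypt_this; infer_instance

-- ===== CLAIM (what is proved, stated in full; the proofs are below) =====
def Claim_equal_encrypt_this : Prop := ∀ (text : String), Dom_encrypt_this text → Spec_encrypt_this text (encrypt_this text)

-- ===== LEMMAS AND PROOFS =====

-- setting the last position rewrites the list as dropLast ++ [d]
theorem pvSet_last (l : List Char) (d : Char) : l ≠ [] → l.set (l.length - 1) d = l.dropLast ++ [d] := by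
  induction l with
  | nil => intro h; simp at h
  | cons a t ih =>
    intro _
    cases t with
    | nil => simp
    | cons b t' => simp_all

-- a middle segment of index lookups is a take-drop slice of the list
theorem pvMapRange (l : List Char) (a b : Nat) (hb : b ≤ l.length) :
    (PySem.List.pyRange (a : Int) (b : Int) 1).map (fun i => PySem.List.pyGetD l i ' ')
      = (l.take b).drop a := by
  have hmap : (PySem.List.pyRange (a : Int) (b : Int) 1).map (fun i => PySem.List.pyGetD l i ' ')
      = (PySem.List.pyRange (a : Int) (((l.take b).length : Nat) : Int) 1).map
          (fun i => PySem.List.pyGetD (l.take b) i ' ') := by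
    have hlen : ((l.take b).length : Nat) = b := by simp [Nat.min_eq_left hb]
    rw [hlen]
    refine List.map_congr_left ?_
    intro i hi
    rw [PySem.List.mem_pyRange_one] at hi
    obtain ⟨h1, h2⟩ := hi
    have hk : i = ((i.toNat : Nat) : Int) := by omega
    rw [hk, PySem.List.pyGetD_natCast, PySem.List.pyGetD_natCast]
    have hkb : i.toNat < b := by omega
    have hkl : i.toNat < l.length := by omega
    rw [List.getD_eq_getElem l ' ' hkl,
        List.getD_eq_getElem (l.take b) ' ' (by simpa [Nat.min_eq_left hb] using hkb)]
    simp
  rw [hmap]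
  have := PySem.List.map_pyGetD_pyRange (l.take b) ' ' (a := (a : Int)) (by positivity)
  simp only [PySem.List.len] at this
  simpa using this

-- the two per-word encodings agree on nonempty words
theorem pvWord_eq (w : List Char) (hw : w ≠ []) : pvEncWordA w = pvEncB w := by
  match w with
  | [c] =>
    simp [pvEncWordA, pvEncB, PySem.List.pyGetD, PySem.List.pyGet?, PySem.List.pyIdx?,
      PySem.List.pyRange_one_eq_nil]
  | [c, d] =>
    have hA : pvEncWordA [c, d] = PySem.Int.toChars (c.toNat : Int) ++ [d] := by
      simp [pvEncWordA, PySem.List.pyGetD, PySem.List.pyGet?, PySem.List.pyIdx?,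
        PySem.List.pySetD, PySem.List.pySet?]
    have hrng : PySem.List.pyRange 1 ((([c, d].length : Nat)) : Int) 1 = [1] := by
      rw [show ((([c, d].length : Nat)) : Int) = 1 + 1 by norm_num,
        PySem.List.pyRange_one_singleton]
    have hB : pvEncB [c, d] = PySem.Int.toChars (c.toNat : Int) ++ [d] := by
      simp only [pvEncB]
      rw [hrng, PySem.List.pyGetD_ofNat']
      norm_num
      rw [PySem.List.pyGetD_ofNat']
      rfl
    rw [hA, hB]
  | c :: d :: e :: r =>
    have hlen : (c :: d :: e :: r).length = r.length + 3 := by simp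
    have hcast : ((c :: d :: e :: r).length : Int) - 1 = ((r.length + 2 : Nat) : Int) := by
      simp; omega
    -- ===== A side =====
    unfold pvEncWordA
    rw [hcast]
    rw [PySem.List.pyGetD_natCast]
    have hget1 : PySem.List.pyGetD (c :: d :: e :: r) 1 ' ' = (c :: d :: e :: r).getD 1 ' ' := by
      rw [show (1 : Int) = ((1 : Nat) : Int) by norm_num, PySem.List.pyGetD_natCast]
    rw [hget1]
    simp only [PySem.List.pySetD_natCast]
    have hgl : (c :: d :: e :: r).getD (r.length + 2) ' ' = (e :: r).getLast (by simp) := by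
      simp [List.getLast_eq_getElem, List.getD_eq_getElem?_getD]
    have hset1 : (c :: d :: e :: r).set 1 ((e :: r).getLast (by simp))
        = c :: (e :: r).getLast (by simp) :: e :: r := by simp
    have hsetD1 : PySem.List.pySetD (c :: d :: e :: r) 1 ((e :: r).getLast (by simp))
        = (c :: d :: e :: r).set 1 ((e :: r).getLast (by simp)) := by
      rw [show (1 : Int) = ((1 : Nat) : Int) by norm_num, PySem.List.pySetD_natCast]
    rw [hgl, hsetD1, hset1]
    have hset2 : (c :: (e :: r).getLast (by simp) :: e :: r).set (r.length + 2) ((c :: d :: e :: r).getD 1 ' ')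
        = c :: (e :: r).getLast (by simp) :: ((e :: r).set r.length d) := by
      simp [List.set]
    have hset3 : (e :: r).set r.length d = (e :: r).dropLast ++ [d] := by
      have h := pvSet_last (e :: r) d (by simp)
      simpa using h
    rw [hset2, hset3]
    rw [if_pos (show 1 < (c :: d :: e :: r).length by simp)]
    -- ===== B side =====
    simp only [pvEncB]
    have hn : ((c :: d :: e :: r).length : Int) = (r.length : Int) + 3 := by push_cast [hlen]; ring
    rw [hn]
    have h0 : PySem.List.pyGetD (c :: d :: e :: r) 0 ' ' = c := by
      rw [PySem.List.pyGetD_ofNat']; rfl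
    rw [h0]
    -- split the index range: 1, then 2..n-2, then n-1
    have hsplit : PySem.List.pyRange 1 ((r.length : Int) + 3) 1
        = 1 :: (PySem.List.pyRange 2 ((r.length : Int) + 2) 1 ++ [(r.length : Int) + 2]) := by
      rw [PySem.List.pyRange_one_cons (by omega)]
      congr 1
      rw [show (1 : Int) + 1 = 2 by norm_num,
        PySem.List.pyRange_one_append 2 ((r.length : Int) + 2) ((r.length : Int) + 3)
          (by omega) (by omega)]
      congr 1
      rw [show (r.length : Int) + 3 = ((r.length : Int) + 2) + 1 by ring,
        PySem.List.pyRange_one_singleton]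
    rw [hsplit]
    simp only [List.map_cons, List.map_append, List.map_nil]
    -- position n-1 reads index 1
    have hiN : (if ((r.length : Int) + 2) = 1 then (r.length : Int) + 3 - 1
          else if ((r.length : Int) + 2) = (r.length : Int) + 3 - 1 then 1
          else (r.length : Int) + 2) = 1 := by
      rw [if_neg (by omega), if_pos (by omega)]
    rw [hiN]
    -- position 1 reads the last character
    simp only [if_true]
    have hgetLast : PySem.List.pyGetD (c :: d :: e :: r) ((r.length : Int) + 3 - 1) ' '
        = (e :: r).getLast (by simp) := by
      rw [show ((r.length : Int) + 3 - 1) = ((r.length + 2 : Nat) : Int) by push_cast; ring,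
        PySem.List.pyGetD_natCast, hgl]
    have hget1' : PySem.List.pyGetD (c :: d :: e :: r) 1 ' ' = d := by
      rw [PySem.List.pyGetD_ofNat']; rfl
    rw [hgetLast, hget1']
    -- the middle indices are untouched: drop the ifs, then use pvMapRange
    have hmid : (PySem.List.pyRange 2 ((r.length : Int) + 2) 1).map
          (fun i => PySem.List.pyGetD (c :: d :: e :: r)
            (if i = 1 then (r.length : Int) + 3 - 1
             else if i = (r.length : Int) + 3 - 1 then 1 else i) ' ')
        = (e :: r).dropLast := by
      have hcong : (PySem.List.pyRange 2 ((r.length : Int) + 2) 1).map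
            (fun i => PySem.List.pyGetD (c :: d :: e :: r)
              (if i = 1 then (r.length : Int) + 3 - 1
               else if i = (r.length : Int) + 3 - 1 then 1 else i) ' ')
          = (PySem.List.pyRange 2 ((r.length : Int) + 2) 1).map
            (fun i => PySem.List.pyGetD (c :: d :: e :: r) i ' ') := by
        refine List.map_congr_left ?_
        intro i hi
        rw [PySem.List.mem_pyRange_one] at hi
        rw [if_neg (by omega), if_neg (by omega)]
      rw [hcong]
      have := pvMapRange (c :: d :: e :: r) 2 (r.length + 2) (by simp)
      rw [show ((r.length : Int) + 2) = ((r.length + 2 : Nat) : Int) by push_cast; ring,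
        show (2 : Int) = ((2 : Nat) : Int) by norm_num, this]
      simp [List.dropLast_eq_take]
    rw [hmid]

-- B's state machine computes exactly split₀'s tokenization, encoded on the fly.
-- B's fold step and end-of-text flush, named so the lemmas below can speak about them
def pvStep (st : List (List Char) × List Char) (ch : Char) : List (List Char) × List Char :=
  if PySem.Chars.isspace ch then
    if st.2.isEmpty then st else (st.1 ++ [pvEncB st.2], [])
  else (st.1, st.2 ++ [ch])

def pvFlush (st : List (List Char) × List Char) : List (List Char) :=
  if st.2.isEmpty then st.1 else st.1 ++ [pvEncB st.2]

theorem pvAlt_eq (text : String) : encrypt_this_alt text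
    = String.ofList (PySem.Chars.join [' '] (pvFlush (text.toList.foldl pvStep ([], [])))) := rfl

-- split₀.go's two unfolding equations
theorem pvGo_nil (cur : List Char) (acc : List (List Char)) :
    PySem.Chars.split₀.go [] cur acc
      = if cur.isEmpty then acc.reverse else (cur.reverse :: acc).reverse := rfl

theorem pvGo_cons (ch : Char) (rest cur : List Char) (acc : List (List Char)) :
    PySem.Chars.split₀.go (ch :: rest) cur acc
      = if PySem.Chars.isspace ch then
          (if cur.isEmpty then PySem.Chars.split₀.go rest [] acc
           else PySem.Chars.split₀.go rest [] (cur.reverse :: acc))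
        else PySem.Chars.split₀.go rest (ch :: cur) acc := rfl

-- go's accumulator is append-extractable …
theorem pvGo_acc (chars : List Char) : ∀ (cur : List Char) (acc : List (List Char)),
    PySem.Chars.split₀.go chars cur acc = acc.reverse ++ PySem.Chars.split₀.go chars cur [] := by
  induction chars with
  | nil =>
    intro cur acc
    by_cases h : cur.isEmpty <;> simp [pvGo_nil, h]
  | cons ch rest ih =>
    intro cur acc
    by_cases hs : PySem.Chars.isspace ch
    · by_cases hc : cur.isEmpty
      · simp only [pvGo_cons, hs, hc, if_true]
        exact ih [] acc
      · simp only [pvGo_cons, hs, hc, if_true, Bool.false_eq_true, if_false]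
        rw [ih [] (cur.reverse :: acc), ih [] [cur.reverse]]
        simp
    · simp only [pvGo_cons, hs, Bool.false_eq_true, if_false]
      exact ih (ch :: cur) acc

-- … and the fold's flushed state is the words go produces, each passed through pvEncB
theorem pvFold_go (chars : List Char) : ∀ (cur : List Char) (ps : List (List Char)),
    pvFlush (chars.foldl pvStep (ps, cur))
      = ps ++ (PySem.Chars.split₀.go chars cur.reverse []).map pvEncB := by
  induction chars with
  | nil =>
    intro cur ps
    by_cases hc : cur.isEmpty
    · have : cur = [] := by simpa [List.isEmpty_iff] using hc
      simp [this, pvFlush, pvGo_nil]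
    · have hcr : cur.reverse.isEmpty = false := by
        simp [List.isEmpty_iff] at hc ⊢; exact hc
      simp [pvFlush, pvGo_nil, hc, hcr]
  | cons ch rest ih =>
    intro cur ps
    by_cases hs : PySem.Chars.isspace ch
    · by_cases hc : cur.isEmpty
      · have hcur : cur = [] := by simpa [List.isEmpty_iff] using hc
        rw [List.foldl_cons, show pvStep (ps, cur) ch = (ps, cur) from by
            simp [pvStep, hs, hc], ih cur ps, hcur]
        rw [pvGo_cons]
        simp [hs]
      · have hcr : cur.reverse.isEmpty = false := by
          simp [List.isEmpty_iff] at hc ⊢; exact hc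
        rw [List.foldl_cons, show pvStep (ps, cur) ch = (ps ++ [pvEncB cur], []) from by
            simp [pvStep, hs, hc], ih [] (ps ++ [pvEncB cur])]
        rw [pvGo_cons]
        simp only [hs, hcr, if_true, Bool.false_eq_true, if_false]
        rw [pvGo_acc rest [] [cur.reverse.reverse]]
        simp
    · rw [List.foldl_cons, show pvStep (ps, cur) ch = (ps, cur ++ [ch]) from by
          simp [pvStep, hs], ih (cur ++ [ch]) ps]
      rw [pvGo_cons]
      simp [hs]

-- trimming the trailing space off the accumulated result is join with ' '
theorem pvFlat_dropLast (ps : List (List Char)) :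
    ((ps.map (· ++ [' '])).flatten).dropLast = PySem.Chars.join [' '] ps := by
  induction ps with
  | nil => rfl
  | cons p ps ih =>
    cases ps with
    | nil => simp [PySem.Chars.join, List.intercalate, List.intersperse]
    | cons q ps' =>
      have hne : ((List.map (· ++ [' ']) (q :: ps')).flatten) ≠ [] := by simp
      have hgrp : p ++ ([' '] ++ (q ++ ([' '] ++ (List.map (· ++ [' ']) ps').flatten)))
          = (p ++ [' ']) ++ (List.map (· ++ [' ']) (q :: ps')).flatten := by simp
      simp only [List.map_cons, List.flatten_cons, List.append_assoc]
      rw [hgrp, List.dropLast_append_of_ne_nil hne, ih]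
      simp [PySem.Chars.join, List.intercalate, List.intersperse]

theorem pvSlice_drop_last (l : List Char) :
    PySem.List.slice l none (some ((l.length : Int) - 1)) = l.dropLast := by
  cases l with
  | nil => rfl
  | cons a t =>
    have h : ((a :: t).length : Int) - 1 = ((t.length : Nat) : Int) := by simp
    rw [h, PySem.List.slice_to_natCast]
    simp [List.dropLast_eq_take]

-- every word split₀ produces is nonempty
theorem pvGo_ne_nil (chars : List Char) : ∀ (cur : List Char) (acc : List (List Char)),
    (∀ w ∈ acc, w ≠ []) → ∀ w ∈ PySem.Chars.split₀.go chars cur acc, w ≠ [] := by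
  induction chars with
  | nil =>
    intro cur acc hacc w hw
    by_cases hc : cur.isEmpty
    · simp [pvGo_nil, hc] at hw
      exact hacc w (by simpa using hw)
    · simp [pvGo_nil, hc] at hw
      rcases hw with hw | hw
      · exact hacc w (by simpa using hw)
      · subst hw
        simp [List.isEmpty_iff] at hc
        simpa using hc
  | cons ch rest ih =>
    intro cur acc hacc w hw
    by_cases hs : PySem.Chars.isspace ch
    · by_cases hc : cur.isEmpty
      · simp only [pvGo_cons, hs, hc, if_true] at hw
        exact ih [] acc hacc w hw
      · simp only [pvGo_cons, hs, hc, if_true, Bool.false_eq_true, if_false] at hw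
        refine ih [] (cur.reverse :: acc) ?_ w hw
        intro v hv
        rcases hv with _ | hv
        · simp [List.isEmpty_iff] at hc
          simpa using hc
        · exact hacc v (by assumption)
    · simp only [pvGo_cons, hs, Bool.false_eq_true, if_false] at hw
      exact ih (ch :: cur) acc hacc w hw

-- ===== VERDICT (by name: the statement is the Claim_ definition above) =====
theorem encrypt_this_spec : Claim_equal_encrypt_this := by
  intro text _
  unfold Spec_encrypt_this
  rw [pvAlt_eq]
  simp only [encrypt_this]
  simp only [PySem.List.foldl_append_eq_flatMap, List.nil_append, List.flatMap_def]
  rw [pvSlice_drop_last]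
  rw [show (fun (x : List Char) => pvEncWordA x ++ [' ']) = ((fun p => p ++ [' ']) ∘ pvEncWordA) from rfl,
    ← List.map_map, pvFlat_dropLast]
  have hfold := pvFold_go text.toList [] []
  simp only [List.reverse_nil, List.nil_append] at hfold
  rw [hfold]
  congr 1
  unfold PySem.Chars.split₀
  exact congrArg (fun l => PySem.Chars.join [' '] l)
    (List.map_congr_left fun w hw => pvWord_eq w (pvGo_ne_nil text.toList [] [] (by simp) w hw))
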